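-- pv_equiv track=rewrite | github.com/TheMattBerman/landing-page-factory | skills/page-build/scripts/prepare-build-meta.py | choose_mechanism_image
-- ===== SOURCE A (Python) =====
-- def choose_first(images: list[dict], *, section_contains=None, preservation_class=None):
--     for image in images:
--         if section_contains and section_contains not in (image.get("section") or "").lower():
--             continue
--         if preservation_class and image.get("preservation_class") != preservation_class:
--             continue
--         return image
--     return None
--
-- def choose_mechanism_image(images: list[dict]):
--     for image in images:
--         section = (image.get("section") or "").lower()
--         if "mechanism" in section or "how-it-works" in section:
--             return image
--     for preservation_class in ("exact_product", "concept_support", "branded_environment"):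
--         image = choose_first(images, preservation_class=preservation_class)
--         if image:
--             return image
--     return None
-- ===== SOURCE B (Python) =====
-- def choose_mechanism_image(images: list[dict]):
--     best = None
--     best_key = 4  # sentinel: no match yet
--     for image in images:
--         section = (image.get("section") or "").lower()
--         if "mechanism" in section or "how-it-works" in section:
--             return image  # keyword match dominates everything
--         pc = image.get("preservation_class")
--         if pc == "exact_product":
--             k = 1
--         elif pc == "concept_support":
--             k = 2
--         elif pc == "branded_environment":
--             k = 3
--         else:
--             k = 4
--         if k < best_key:
--             best, best_key = image, k
--     return best
-- ===== Notes on version B (the rewrite author's own statement) =====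
-- stated objective: alternative
-- what changed: Replaces A's keyword pass plus three separate preservation-class scans of the list with a single traversal that scores each image (0 for a keyword section, 1/2/3 by class, 4 for no match) and keeps the earliest lowest-scoring image.
import Mathlib
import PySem

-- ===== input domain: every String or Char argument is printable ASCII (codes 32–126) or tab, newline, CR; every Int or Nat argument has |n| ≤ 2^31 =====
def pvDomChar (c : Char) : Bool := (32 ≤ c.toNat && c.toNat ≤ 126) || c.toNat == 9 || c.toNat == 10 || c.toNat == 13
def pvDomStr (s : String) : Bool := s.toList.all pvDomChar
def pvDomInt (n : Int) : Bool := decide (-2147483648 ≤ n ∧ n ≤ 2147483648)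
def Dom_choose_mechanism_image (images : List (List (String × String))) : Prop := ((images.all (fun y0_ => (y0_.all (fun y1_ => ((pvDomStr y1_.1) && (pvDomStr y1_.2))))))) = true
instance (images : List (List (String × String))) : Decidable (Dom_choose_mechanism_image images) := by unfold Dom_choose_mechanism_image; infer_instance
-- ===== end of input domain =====

-- B replaces A's keyword pass plus three per-class scans with one scoring traversal keeping the
-- earliest lowest-scoring image (objective: alternative single-pass decomposition; same result).

-- ===== PORT A =====
-- `image.get(k)` on a dict given as an assoc list: first-match lookup.
def pvDictGet (image : List (String × String)) (k : String) : Option String :=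
  (PySem.Dict.mk image).get? k

-- `(image.get("section") or "").lower()`  ('or ""' maps both None and "" to "")
def pvSectionLower (image : List (String × String)) : String :=
  PySem.Str.lower ((pvDictGet image "section").getD "")

-- choose_first, both keyword-only parameters kept (None ↦ none; Python truthiness: some s with s ≠ "").
def choose_first (images : List (List (String × String)))
    (section_contains preservation_class : Option String) : Option (List (String × String)) :=
  match images with
  | [] => none
  | image :: rest =>
    if (match section_contains with
        | some s => s != "" && !(PySem.Str.isIn s (pvSectionLower image))
        | none => false) then
      choose_first rest section_contains preservation_class
    else if (match preservation_class with
        | some p => p != "" && !(pvDictGet image "preservation_class" == some p)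
        | none => false) then
      choose_first rest section_contains preservation_class
    else some image

-- first loop of choose_mechanism_image
def cmiKeywordLoop (images : List (List (String × String))) : Option (List (String × String)) :=
  match images with
  | [] => none
  | image :: rest =>
    let sec := pvSectionLower image
    if PySem.Str.isIn "mechanism" sec || PySem.Str.isIn "how-it-works" sec then
      some image
    else cmiKeywordLoop rest

-- second loop: `for preservation_class in (...)`; `if image:` is Python truthiness (None and {} are falsy)
def cmiClassLoop (images : List (List (String × String))) (classes : List String) :
    Option (List (String × String)) :=
  match classes with
  | [] => none
  | pc :: rest =>
    match choose_first images none (some pc) with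
    | some image => if image.isEmpty then cmiClassLoop images rest else some image
    | none => cmiClassLoop images rest

def choose_mechanism_image (images : List (List (String × String))) : Option (List (String × String)) :=
  match cmiKeywordLoop images with
  | some image => some image
  | none => cmiClassLoop images ["exact_product", "concept_support", "branded_environment"]

-- ===== PORT B =====
-- single pass keeping (best, best_key); keyword returns at once, otherwise update on strictly smaller key
def altLoop (images : List (List (String × String))) (best : Option (List (String × String)))
    (bestKey : Nat) : Option (List (String × String)) :=
  match images with
  | [] => best
  | image :: rest =>
    let sec := PySem.Str.lower (((PySem.Dict.mk image).get? "section").getD "")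
    if PySem.Str.isIn "mechanism" sec || PySem.Str.isIn "how-it-works" sec then
      some image
    else
      let pc := (PySem.Dict.mk image).get? "preservation_class"
      let k : Nat :=
        if pc == some "exact_product" then 1
        else if pc == some "concept_support" then 2
        else if pc == some "branded_environment" then 3
        else 4
      if k < bestKey then altLoop rest (some image) k else altLoop rest best bestKey

def choose_mechanism_image_alt (images : List (List (String × String))) : Option (List (String × String)) :=
  altLoop images none 4

-- ===== PRECONDITION & SPEC =====
def Spec_choose_mechanism_image (images : List (List (String × String))) (out : Option (List (String × String))) : Prop := out = choose_mechanism_image_alt images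
instance (images : List (List (String × String))) (out : Option (List (String × String))) : Decidable (Spec_choose_mechanism_image images out) := by unfold Spec_choose_mechanism_image; infer_instance

-- ===== CLAIM (what is proved, stated in full; the proofs are below) =====
def Claim_equal_choose_mechanism_image : Prop := ∀ (images : List (List (String × String))), Dom_choose_mechanism_image images → Spec_choose_mechanism_image images (choose_mechanism_image images)

-- ===== LEMMAS AND PROOFS =====

-- keyword predicate and the B-side score, as proof-side functions
def kwB (image : List (String × String)) : Bool :=
  PySem.Str.isIn "mechanism" (pvSectionLower image) ||
    PySem.Str.isIn "how-it-works" (pvSectionLower image)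

def keyOf (image : List (String × String)) : Nat :=
  if kwB image then 0
  else if pvDictGet image "preservation_class" == some "exact_product" then 1
  else if pvDictGet image "preservation_class" == some "concept_support" then 2
  else if pvDictGet image "preservation_class" == some "branded_environment" then 3
  else 4

def clsName : Nat → String
  | 1 => "exact_product"
  | 2 => "concept_support"
  | 3 => "branded_environment"
  | _ => ""

-- priority chain: first element with key < j, lower keys first
def chain (l : List (List (String × String))) : Nat → Option (List (String × String))
  | 0 => none
  | j + 1 => (chain l j).or (l.find? (fun i => keyOf i == j))

theorem chain_nil (j : Nat) : chain [] j = none := by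
  induction j with
  | zero => rfl
  | succ j ih => simp [chain, ih]

theorem chain_mono {l : List (List (String × String))} {j j' : Nat} {x : List (String × String)}
    (h : chain l j = some x) (hle : j ≤ j') : chain l j' = some x := by
  induction j' with
  | zero =>
    have hj : j = 0 := by omega
    subst hj; simp [chain] at h
  | succ j' ih =>
    rcases Nat.lt_or_ge j (j' + 1) with hlt | hge
    · rcases Nat.lt_or_ge j j' with h2 | h2
      · have := ih (Nat.le_of_lt h2)
        simp [chain, this]
      · have : j = j' := by omega
        subst this
        simp [chain, h]
    · have : j = j' + 1 := by omega
      subst this; exact h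

theorem chain_cons_skip {i : List (String × String)} {t : List (List (String × String))} {j : Nat}
    (h : j ≤ keyOf i) : chain (i :: t) j = chain t j := by
  induction j with
  | zero => rfl
  | succ j ih =>
    have hne : (keyOf i == j) = false := by simp; omega
    simp [chain, ih (by omega), List.find?_cons, hne]

theorem chain_cons_at {i : List (String × String)} {t : List (List (String × String))} {k : Nat}
    (h : keyOf i = k) : chain (i :: t) (k + 1) = (chain t k).or (some i) := by
  simp [chain, chain_cons_skip (le_of_eq h.symm), List.find?_cons, h]

theorem keyOf_pos (i : List (String × String)) (h : kwB i = false) : 1 ≤ keyOf i := by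
  unfold keyOf
  simp [h]
  split <;> [skip; split <;> [skip; split]] <;> omega

-- the single pass computes the priority chain
theorem altLoop_eq_chain (l : List (List (String × String))) :
    ∀ best bk, 1 ≤ bk → altLoop l best bk = (chain l bk).or best := by
  induction l with
  | nil => intro best bk _; simp [altLoop, chain_nil]
  | cons i t ih =>
    intro best bk hbk
    by_cases hkw : kwB i
    · have hkey : keyOf i = 0 := by simp [keyOf, hkw]
      have h1 : chain (i :: t) 1 = some i := by
        simp [chain, List.find?_cons, hkey]
      have := chain_mono h1 hbk
      simp only [altLoop]
      rw [show (PySem.Str.isIn "mechanism" (PySem.Str.lower (((PySem.Dict.mk i).get? "section").getD "")) ||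
            PySem.Str.isIn "how-it-works" (PySem.Str.lower (((PySem.Dict.mk i).get? "section").getD ""))) = kwB i from rfl,
          hkw, this]
      rfl
    · have hkw' : kwB i = false := by simpa using hkw
      have hkey : keyOf i =
          (if (PySem.Dict.mk i).get? "preservation_class" == some "exact_product" then 1
           else if (PySem.Dict.mk i).get? "preservation_class" == some "concept_support" then 2
           else if (PySem.Dict.mk i).get? "preservation_class" == some "branded_environment" then 3
           else 4) := by
        simp [keyOf, hkw', pvDictGet]
      have hpos := keyOf_pos i hkw'
      simp only [altLoop]
      rw [show (PySem.Str.isIn "mechanism" (PySem.Str.lower (((PySem.Dict.mk i).get? "section").getD "")) ||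
            PySem.Str.isIn "how-it-works" (PySem.Str.lower (((PySem.Dict.mk i).get? "section").getD ""))) = kwB i from rfl,
          hkw']
      simp only [Bool.false_eq_true, if_false, ← hkey]
      by_cases hlt : keyOf i < bk
      · rw [if_pos hlt, ih (some i) (keyOf i) hpos]
        have hc : chain (i :: t) (keyOf i + 1) = (chain t (keyOf i)).or (some i) :=
          chain_cons_at rfl
        rcases hx : chain t (keyOf i) with _ | x
        · have : chain (i :: t) (keyOf i + 1) = some i := by rw [hc, hx]; rfl
          rw [chain_mono this (by omega)]
          simp [hx]
        · have : chain (i :: t) (keyOf i + 1) = some x := by rw [hc, hx]; rfl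
          rw [chain_mono this (by omega)]
          simp [hx]
      · rw [if_neg hlt, ih best bk hbk, chain_cons_skip (by omega)]

-- A's first loop is find? over the keyword predicate
theorem cmiKeywordLoop_eq (l : List (List (String × String))) :
    cmiKeywordLoop l = l.find? kwB := by
  induction l with
  | nil => rfl
  | cons i t ih =>
    by_cases h : kwB i
    · simp only [cmiKeywordLoop]
      rw [show (PySem.Str.isIn "mechanism" (pvSectionLower i) ||
            PySem.Str.isIn "how-it-works" (pvSectionLower i)) = kwB i from rfl, h]
      simp [List.find?_cons, h]
    · have h' : kwB i = false := by simpa using h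
      simp only [cmiKeywordLoop]
      rw [show (PySem.Str.isIn "mechanism" (pvSectionLower i) ||
            PySem.Str.isIn "how-it-works" (pvSectionLower i)) = kwB i from rfl, h']
      simp [List.find?_cons, h', ih]

-- choose_first with only a preservation class is find? over the class predicate
theorem choose_first_eq (l : List (List (String × String))) (p : String) (hp : p ≠ "") :
    choose_first l none (some p) =
      l.find? (fun i => pvDictGet i "preservation_class" == some p) := by
  induction l with
  | nil => rfl
  | cons i t ih =>
    simp only [choose_first]
    have hps : (p != "") = true := by simpa using hp
    by_cases h : pvDictGet i "preservation_class" == some p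
    · simp [List.find?_cons, h, hps]
    · have h' : (pvDictGet i "preservation_class" == some p) = false := by simpa using h
      simp [List.find?_cons, h', hps, ih]

theorem found_class_ne_nil {l : List (List (String × String))} {p : String}
    {img : List (String × String)}
    (h : l.find? (fun i => pvDictGet i "preservation_class" == some p) = some img) :
    img.isEmpty = false := by
  have := List.find?_some h
  simp at this
  rcases img with _ | ⟨a, t⟩
  · exfalso
    have : pvDictGet [] "preservation_class" = none := rfl
    simp_all
  · rfl

-- under "no keyword image", scoring j agrees with scanning for class j
theorem find?_key_eq_find?_class (l : List (List (String × String))) (j : Nat)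
    (hj : 1 ≤ j) (hj3 : j ≤ 3) (hnokw : ∀ i ∈ l, kwB i = false) :
    l.find? (fun i => keyOf i == j) =
      l.find? (fun i => pvDictGet i "preservation_class" == some (clsName j)) := by
  induction l with
  | nil => rfl
  | cons i t ih =>
    have hkw := hnokw i (by simp)
    have heq : (keyOf i == j) = (pvDictGet i "preservation_class" == some (clsName j)) := by
      unfold keyOf
      rw [hkw]
      simp only [Bool.false_eq_true, if_false]
      interval_cases j <;>
        · simp only [clsName]
          split <;> [skip; split <;> [skip; split]] <;> simp_all
    rw [List.find?_cons, List.find?_cons, heq]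
    split
    · rfl
    · exact ih (fun x hx => hnokw x (by simp [hx]))

theorem cmi_eq_chain (l : List (List (String × String))) :
    choose_mechanism_image l = chain l 4 := by
  have hch : chain l 4 =
      ((((l.find? (fun i => keyOf i == 0)).or (l.find? (fun i => keyOf i == 1))).or
        (l.find? (fun i => keyOf i == 2))).or (l.find? (fun i => keyOf i == 3))) := by
    simp [chain]
  have hkw0 : (fun i => keyOf i == 0) = kwB := by
    funext i
    by_cases h : kwB i
    · simp [keyOf, h]
    · have h' : kwB i = false := by simpa using h
      have := keyOf_pos i h'
      simp [h']
      omega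
  unfold choose_mechanism_image
  rw [cmiKeywordLoop_eq]
  rcases hf : l.find? kwB with _ | x
  · -- no keyword image: the three class scans
    have hnokw : ∀ i ∈ l, kwB i = false := by
      intro i hi
      have := List.find?_eq_none.mp hf i hi
      simpa using this
    rw [hch, hkw0, hf]
    have e1 := find?_key_eq_find?_class l 1 (by omega) (by omega) hnokw
    have e2 := find?_key_eq_find?_class l 2 (by omega) (by omega) hnokw
    have e3 := find?_key_eq_find?_class l 3 (by omega) (by omega) hnokw
    simp only [Option.none_or]
    unfold cmiClassLoop
    rw [choose_first_eq l "exact_product" (by decide)]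
    rcases h1 : l.find? (fun i => pvDictGet i "preservation_class" == some "exact_product") with _ | x1
    · simp only []
      unfold cmiClassLoop
      rw [choose_first_eq l "concept_support" (by decide)]
      rcases h2 : l.find? (fun i => pvDictGet i "preservation_class" == some "concept_support") with _ | x2
      · simp only []
        unfold cmiClassLoop
        rw [choose_first_eq l "branded_environment" (by decide)]
        rcases h3 : l.find? (fun i => pvDictGet i "preservation_class" == some "branded_environment") with _ | x3
        · simp [e1, e2, e3, h1, h2, h3, clsName, cmiClassLoop]
        · simp [found_class_ne_nil h3, e1, e2, e3, h1, h2, h3, clsName]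
      · simp [found_class_ne_nil h2, e1, e2, e3, h1, h2, clsName]
    · simp [found_class_ne_nil h1, e1, h1, clsName]
  · rw [hch, hkw0, hf]
    simp

-- ===== VERDICT (by name: the statement is the Claim_ definition above) =====
theorem choose_mechanism_image_spec : Claim_equal_choose_mechanism_image := by
  intro images _
  show choose_mechanism_image images = choose_mechanism_image_alt images
  rw [cmi_eq_chain, choose_mechanism_image_alt, altLoop_eq_chain images none 4 (by omega)]
  simp
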